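-- pv_equiv track=rewrite | github.com/yulab2021/DynamicFold | results/dataset/sequences/motif_coverage.py | count_motif
-- ===== SOURCE A (Python) =====
-- def count_motif(sequence, motif_length):
--     end = len(sequence) - motif_length + 1
--     motifs = dict()
--     for start in range(motif_length):
--         for i in range(start, end, motif_length):
--             motif = sequence[i:i+motif_length]
--             if 'N' in motif:
--                 continue
--             if motif in motifs:
--                 motifs[motif] += 1
--             else:
--                 motifs[motif] = 1
--     return motifs
-- ===== SOURCE B (Python) =====
-- def count_motif(sequence, motif_length):
--     n = len(sequence)
--     # nfree[i] = number of consecutive non-'N' characters starting at index i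
--     nfree = [0]
--     for ch in reversed(sequence):
--         nfree.append(0 if ch == 'N' else nfree[-1] + 1)
--     nfree.reverse()
--     counts = {}
--     for phase in range(motif_length):
--         for i in range(phase, n - motif_length + 1, motif_length):
--             if nfree[i] >= motif_length:
--                 motif = sequence[i:i + motif_length]
--                 counts[motif] = counts.get(motif, 0) + 1
--     return counts
-- ===== Notes on version B (the rewrite author's own statement) =====
-- stated objective: alternative
-- what changed: B precomputes, in one right-to-left pass, a run-length table nfree[i] = length of the N-free run starting at i, and decides each window by the comparison nfree[i] >= motif_length, removing A's per-window "'N' in motif" substring scan; the traversal order and dict updates are otherwise position-for-position the same, so the result (including key insertion order) is identical.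
import Mathlib
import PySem

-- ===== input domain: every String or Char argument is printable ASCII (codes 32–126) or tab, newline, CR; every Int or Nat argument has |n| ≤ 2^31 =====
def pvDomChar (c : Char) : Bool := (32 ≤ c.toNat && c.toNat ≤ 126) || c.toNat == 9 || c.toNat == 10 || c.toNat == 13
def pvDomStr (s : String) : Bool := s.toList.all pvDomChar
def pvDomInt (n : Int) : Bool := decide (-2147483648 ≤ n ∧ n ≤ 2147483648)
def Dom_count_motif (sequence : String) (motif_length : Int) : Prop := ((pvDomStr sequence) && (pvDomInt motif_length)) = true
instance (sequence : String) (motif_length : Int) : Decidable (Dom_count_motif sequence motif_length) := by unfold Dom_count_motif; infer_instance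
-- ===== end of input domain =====

-- B replaces A's per-window "'N' in motif" scan by a right-to-left precomputed run-length
-- table of N-free characters (objective: alternative; same traversal order, so same dict).

-- ===== PORT A =====
def count_motif (sequence : String) (motif_length : Int) : List (String × Int) :=
  let s := sequence.toList
  let end_ : Int := (s.length : Int) - motif_length + 1
  let motifs : PySem.Dict (List Char) Int :=
    (PySem.List.pyRange 0 motif_length 1).foldl (fun d start =>
      (PySem.List.pyRange start end_ motif_length).foldl (fun d i =>
        let motif := PySem.List.slice s (some i) (some (i + motif_length))
        if PySem.Chars.isIn ['N'] motif then d
        else if d.contains motif then d.insert motif (d.getD motif 0 + 1)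
        else d.insert motif 1) d) PySem.Dict.empty
  motifs.items.map (fun p => (String.ofList p.1, p.2))

-- ===== PORT B =====
-- Source B builds nfree right-to-left (append to the end of the reversed list, then reverse);
-- ported as the equivalent right-to-left structural recursion (cons instead of append+reverse).
def nfreeList : List Char → List Int
  | [] => [0]
  | c :: cs =>
    let rest := nfreeList cs
    (if c = 'N' then 0 else rest.headI + 1) :: rest

def count_motif_alt (sequence : String) (motif_length : Int) : List (String × Int) :=
  let s := sequence.toList
  let nfree := nfreeList s
  let counts : PySem.Dict (List Char) Int :=
    (PySem.List.pyRange 0 motif_length 1).foldl (fun d phase =>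
      (PySem.List.pyRange phase ((s.length : Int) - motif_length + 1) motif_length).foldl (fun d i =>
        if motif_length ≤ PySem.List.pyGetD nfree i 0 then
          let motif := PySem.List.slice s (some i) (some (i + motif_length))
          d.insert motif (d.getD motif 0 + 1)
        else d) d) PySem.Dict.empty
  counts.items.map (fun p => (String.ofList p.1, p.2))

-- ===== PRECONDITION & SPEC =====
def Spec_count_motif (sequence : String) (motif_length : Int) (out : List (String × Int)) : Prop := out = count_motif_alt sequence motif_length
instance (sequence : String) (motif_length : Int) (out : List (String × Int)) : Decidable (Spec_count_motif sequence motif_length out) := by unfold Spec_count_motif; infer_instance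

-- ===== CLAIM (what is proved, stated in full; the proofs are below) =====
def Claim_equal_count_motif : Prop := ∀ (sequence : String) (motif_length : Int), Dom_count_motif sequence motif_length → Spec_count_motif sequence motif_length (count_motif sequence motif_length)

-- ===== LEMMAS AND PROOFS =====

-- nfree table characterisation: entry k is the length of the N-free run starting at k
theorem nfreeList_getD (s : List Char) (k : Nat) (hk : k ≤ s.length) :
    (nfreeList s).getD k 0 = (((s.drop k).takeWhile (fun c => c ≠ 'N')).length : Int) := by
  induction s generalizing k with
  | nil =>
    have : k = 0 := Nat.le_zero.mp hk
    subst this; simp [nfreeList]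
  | cons c cs ih =>
    cases k with
    | zero =>
      have h0 := ih 0 (Nat.zero_le _)
      have hhead : (nfreeList cs).headI = (nfreeList cs).getD 0 0 := by
        cases cs <;> simp [nfreeList]
      by_cases hc : c = 'N'
      · simp [nfreeList, hc]
      · rw [List.drop_zero] at h0 ⊢
        rw [List.takeWhile_cons_of_pos (by simp [hc])]
        simp only [nfreeList, List.getD_cons_zero, if_neg hc, List.length_cons, hhead, h0]
        push_cast
        ring
    | succ j =>
      have := ih j (by simpa using hk)
      simpa [nfreeList] using this

-- a window is N-free iff the run starting at its start is long enough
theorem takeWhile_len_iff {α : Type} (p : α → Bool) (bad : α) (l : List α) (m : Nat)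
    (hm : m ≤ l.length) (hp : ∀ a, p a = true ↔ a ≠ bad) :
    (m ≤ (l.takeWhile p).length) ↔ bad ∉ l.take m := by
  induction l generalizing m with
  | nil => simp at hm; simp [hm]
  | cons a l ih =>
    cases m with
    | zero => simp
    | succ m =>
      by_cases ha : a = bad
      · subst ha
        have hpa : p a = false := by
          cases h : p a
          · rfl
          · exact absurd ((hp a).mp h) (fun hne => hne rfl)
        simp [List.takeWhile, hpa]
      · have hpa : p a = true := (hp a).mpr ha
        simp only [List.takeWhile, hpa, List.take, List.length_cons, List.mem_cons]
        constructor
        · intro h hmem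
          rcases hmem with h1 | h2
          · exact ha h1.symm
          · exact ((ih m (by simpa using hm)).mp (by omega)) h2
        · intro h
          have := (ih m (by simpa using hm)).mpr (fun hb => h (Or.inr hb))
          omega

-- ===== VERDICT (by name: the statement is the Claim_ definition above) =====
theorem count_motif_spec : Claim_equal_count_motif := by
  intro sequence motif_length _
  unfold Spec_count_motif count_motif count_motif_alt
  simp only []
  congr 2
  apply PySem.List.foldl_congr_mem'
  intro phase hphase d
  have hml : 0 ≤ phase ∧ phase < motif_length := by
    simpa [PySem.List.mem_pyRange_one] using hphase
  have hpos : (0:Int) < motif_length := by omega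
  apply PySem.List.foldl_congr_mem'
  intro i hi d
  have hib : phase ≤ i ∧ i < (sequence.toList.length : Int) - motif_length + 1 := by
    have := (PySem.List.mem_pyRange_iff_of_pos hpos i).mp hi
    exact ⟨this.1, this.2.1⟩
  have h0i : 0 ≤ i := by omega
  have hend : i + motif_length ≤ (sequence.toList.length : Int) := by omega
  -- the slice is (drop i.toNat).take motif_length.toNat
  have hslice : PySem.List.slice sequence.toList (some i) (some (i + motif_length))
      = (sequence.toList.drop i.toNat).take motif_length.toNat := by
    rw [PySem.List.slice_toNat _ h0i (by omega)]
    congr 1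
    omega
  -- condition equivalence
  have hklen : i.toNat ≤ sequence.toList.length := by omega
  have hmlen : motif_length.toNat ≤ (sequence.toList.drop i.toNat).length := by
    simp only [List.length_drop]; omega
  have hgd : PySem.List.pyGetD (nfreeList sequence.toList) i 0
      = (nfreeList sequence.toList).getD i.toNat 0 := by
    rw [PySem.List.pyGetD_of_nonneg _ _ h0i]
  have hcond : (motif_length ≤ PySem.List.pyGetD (nfreeList sequence.toList) i 0)
      ↔ 'N' ∉ (sequence.toList.drop i.toNat).take motif_length.toNat := by
    rw [hgd, nfreeList_getD _ _ hklen]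
    rw [show (motif_length ≤ ((((sequence.toList.drop i.toNat).takeWhile (fun c => c ≠ 'N')).length : Nat) : Int))
        ↔ motif_length.toNat ≤ ((sequence.toList.drop i.toNat).takeWhile (fun c => c ≠ 'N')).length from by omega]
    exact takeWhile_len_iff _ 'N' _ _ hmlen (by intro a; simp)
  have hisin : PySem.Chars.isIn ['N'] (PySem.List.slice sequence.toList (some i) (some (i + motif_length)))
      = true ↔ 'N' ∈ (sequence.toList.drop i.toNat).take motif_length.toNat := by
    rw [hslice, PySem.Chars.isIn_iff_infix]
    constructor
    · intro h; exact h.subset (by simp)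
    · intro h
      rcases List.append_of_mem h with ⟨u, v, huv⟩
      exact ⟨u, v, by simp [huv]⟩
  by_cases hN : 'N' ∈ (sequence.toList.drop i.toNat).take motif_length.toNat
  · have h1 : PySem.Chars.isIn ['N'] (PySem.List.slice sequence.toList (some i) (some (i + motif_length))) = true := hisin.mpr hN
    have h2 : ¬ motif_length ≤ PySem.List.pyGetD (nfreeList sequence.toList) i 0 := fun h => (hcond.mp h) hN
    simp only [h1, if_true, if_neg h2]
  · have h1 : PySem.Chars.isIn ['N'] (PySem.List.slice sequence.toList (some i) (some (i + motif_length))) = false := by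
      cases h : PySem.Chars.isIn ['N'] (PySem.List.slice sequence.toList (some i) (some (i + motif_length)))
      · rfl
      · exact absurd (hisin.mp h) hN
    have h2 : motif_length ≤ PySem.List.pyGetD (nfreeList sequence.toList) i 0 := hcond.mpr hN
    simp only [h1, Bool.false_eq_true, if_false, if_pos h2]
    by_cases hc : d.contains (PySem.List.slice sequence.toList (some i) (some (i + motif_length))) = true
    · simp [hc]
    · have hc' : d.contains (PySem.List.slice sequence.toList (some i) (some (i + motif_length))) = false := by
        cases h : d.contains (PySem.List.slice sequence.toList (some i) (some (i + motif_length)))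
        · rfl
        · exact absurd h hc
      rw [if_neg hc]
      congr 1
      rw [PySem.Dict.getD_of_not_contains _ 0 hc']
      omega
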